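-- pv_equiv track=rewrite | github.com/simmarum/AdventOfCode | 2017/day-09/main.py | part_1
-- ===== SOURCE A (Python) =====
-- def part_1(inp):
--     for line in inp:
--         magic_sum = 0
--         group_lvl = 0
--         is_garbage_open = False
--         is_exclamation_mark = False
--         for c in line:
--             if is_exclamation_mark:
--                 is_exclamation_mark = False
--             elif c == '!':
--                 is_exclamation_mark = True
--             elif c == '<' and is_garbage_open is False:
--                 is_garbage_open = True
--             elif c == '>':
--                 is_garbage_open = False
--             elif c == '{' and is_garbage_open is False:
--                 group_lvl += 1
--             elif c == '}' and is_garbage_open is False: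
--                 magic_sum += group_lvl
--                 group_lvl -= 1
--     return magic_sum
-- ===== SOURCE B (Python) =====
-- def part_1(inp):
--     line = inp[-1]  # each iteration of A's loop overwrites magic_sum; only the last line matters
--     # pass 1: drop every '!' together with the character right after it
--     chars = []
--     i = 0
--     while i < len(line):
--         if line[i] == '!':
--             i += 2
--         else:
--             chars.append(line[i])
--             i += 1
--     # pass 2: strip garbage: on '<', discard through the matching '>'
--     residue = []
--     j = 0
--     while j < len(chars):
--         if chars[j] == '<':
--             j += 1
--             while j < len(chars) and chars[j] != '>':
--                 j += 1
--             j += 1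
--         else:
--             residue.append(chars[j])
--             j += 1
--     # pass 3: score the group structure
--     total = 0
--     depth = 0
--     for c in residue:
--         if c == '{':
--             depth += 1
--         elif c == '}':
--             total += depth
--             depth -= 1
--     return total
-- ===== Notes on version B (the rewrite author's own statement) =====
-- stated objective: faster
-- what changed: B replaces A's fused four-flag state machine over every line by indexing the last line directly (A's per-line reset means only the last line counts) and scoring it in three separate passes: cancellation removal, garbage stripping, then a depth scan.
import Mathlib
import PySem

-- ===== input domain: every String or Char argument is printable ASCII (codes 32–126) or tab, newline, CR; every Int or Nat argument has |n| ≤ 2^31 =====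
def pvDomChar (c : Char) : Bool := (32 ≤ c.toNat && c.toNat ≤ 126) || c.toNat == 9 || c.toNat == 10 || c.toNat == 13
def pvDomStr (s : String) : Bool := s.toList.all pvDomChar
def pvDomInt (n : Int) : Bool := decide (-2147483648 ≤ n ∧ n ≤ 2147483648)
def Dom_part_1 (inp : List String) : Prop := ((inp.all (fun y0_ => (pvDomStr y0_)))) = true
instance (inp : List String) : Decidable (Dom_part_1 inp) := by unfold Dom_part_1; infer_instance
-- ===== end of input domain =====

-- B indexes the last line directly (A's per-line reset means only the last line counts) and
-- scores it in three separate passes instead of A's fused four-flag state machine.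
-- Pre_ excludes the empty list, on which A raises NameError (B raises IndexError).

-- ===== PORT A =====
-- state: (magic_sum, group_lvl, is_garbage_open, is_exclamation_mark)
def part1Step (st : Int × Int × Bool × Bool) (c : Char) : Int × Int × Bool × Bool :=
  let (ms, gl, gar, ex) := st
  if ex then (ms, gl, gar, false)
  else if c = '!' then (ms, gl, gar, true)
  else if c = '<' ∧ gar = false then (ms, gl, true, ex)
  else if c = '>' then (ms, gl, false, ex)
  else if c = '{' ∧ gar = false then (ms, gl + 1, gar, ex)
  else if c = '}' ∧ gar = false then (ms + gl, gl - 1, gar, ex)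
  else (ms, gl, gar, ex)

-- the inner 'for c in line' loop, starting from the per-line reset state
def part1Line (line : String) : Int :=
  (line.toList.foldl part1Step (0, 0, false, false)).1

-- the outer 'for line in inp' loop: each line overwrites magic_sum
def part_1 (inp : List String) : Int :=
  inp.foldl (fun _ line => part1Line line) 0

-- ===== PORT B =====
-- pass 1: drop every '!' and the character right after it
def pvCancel : List Char → List Char
  | [] => []
  | ['!'] => []
  | '!' :: _ :: t => pvCancel t
  | c :: rest => c :: pvCancel rest

-- pass 2: strip garbage: on '<', discard through the matching '>' (inner while loop = pvSkip)
mutual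
def pvStrip : List Char → List Char
  | [] => []
  | c :: rest => if c = '<' then pvSkip rest else c :: pvStrip rest
def pvSkip : List Char → List Char
  | [] => []
  | c :: rest => if c = '>' then pvStrip rest else pvSkip rest
end

-- pass 3: depth scan; state (total, depth)
def pvScoreStep (p : Int × Int) (c : Char) : Int × Int :=
  if c = '{' then (p.1, p.2 + 1)
  else if c = '}' then (p.1 + p.2, p.2 - 1)
  else p

def part_1_alt (inp : List String) : Int :=
  match PySem.List.pyGet? inp (-1) with
  | some line => ((pvStrip (pvCancel line.toList)).foldl pvScoreStep (0, 0)).1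
  | none => 0   -- unreachable under Pre_ (inp[-1] raises in Python)

-- ===== PRECONDITION & SPEC =====
-- A raises NameError on the empty list (magic_sum never assigned); B raises IndexError there.
def Pre_part_1 (inp : List String) : Prop := inp ≠ []
instance (inp : List String) : Decidable (Pre_part_1 inp) := by unfold Pre_part_1; infer_instance
def pvWitness_part_1 : List String := ["{{<!>},{}}"]

def Spec_part_1 (inp : List String) (out : Int) : Prop := out = part_1_alt inp
instance (inp : List String) (out : Int) : Decidable (Spec_part_1 inp out) := by unfold Spec_part_1; infer_instance

-- ===== CLAIM (what is proved, stated in full; the proofs are below) =====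
def Claim_equal_part_1 : Prop := ∀ (inp : List String), Dom_part_1 inp → Pre_part_1 inp → Spec_part_1 inp (part_1 inp)

-- ===== LEMMAS AND PROOFS =====

-- the excl-free version of A's machine (state: magic_sum, group_lvl, garbage)
def pvStep3 (st : Int × Int × Bool) (c : Char) : Int × Int × Bool :=
  let (ms, gl, gar) := st
  if c = '<' ∧ gar = false then (ms, gl, true)
  else if c = '>' then (ms, gl, false)
  else if c = '{' ∧ gar = false then (ms, gl + 1, gar)
  else if c = '}' ∧ gar = false then (ms + gl, gl - 1, gar)
  else (ms, gl, gar)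

-- L1: cancellation pass absorbs the exclamation flag
theorem pvL1 : ∀ (cs : List Char) (ms gl : Int) (gar : Bool),
    (cs.foldl part1Step (ms, gl, gar, false)).1 = ((pvCancel cs).foldl pvStep3 (ms, gl, gar)).1 ∧
    (cs.foldl part1Step (ms, gl, gar, false)).2.1 = ((pvCancel cs).foldl pvStep3 (ms, gl, gar)).2.1 ∧
    (cs.foldl part1Step (ms, gl, gar, false)).2.2.1 = ((pvCancel cs).foldl pvStep3 (ms, gl, gar)).2.2 := by
  intro cs
  induction cs using pvCancel.induct with
  | case1 => intro ms gl gar; simp [pvCancel]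
  | case2 => intro ms gl gar; simp [pvCancel, part1Step]
  | case3 x t ih =>
      intro ms gl gar
      have h1 : part1Step (ms, gl, gar, false) '!' = (ms, gl, gar, true) := by
        simp [part1Step]
      have h2 : part1Step (ms, gl, gar, true) x = (ms, gl, gar, false) := by
        simp [part1Step]
      simp only [pvCancel, List.foldl, h1, h2]
      exact ih ms gl gar
  | case4 c rest hn1 hn2 ih =>
      intro ms gl gar
      have hne : c ≠ '!' := by
        intro h
        cases rest with
        | nil => exact hn1 h rfl
        | cons y t => exact hn2 y t h rfl
      have hc : part1Step (ms, gl, gar, false) c = (((pvStep3 (ms, gl, gar) c).1,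
          (pvStep3 (ms, gl, gar) c).2.1, (pvStep3 (ms, gl, gar) c).2.2, false) : Int × Int × Bool × Bool) := by
        simp only [part1Step, pvStep3, hne , Bool.false_eq_true, if_false]
        split_ifs <;> rfl
      have hcan : pvCancel (c :: rest) = c :: pvCancel rest := by
        cases rest with
        | nil =>
            conv_lhs => rw [pvCancel.eq_def]
            simp [pvCancel]
        | cons y t =>
            conv_lhs => rw [pvCancel.eq_def]
            simp
      simp only [hcan, List.foldl, hc]
      have := ih (pvStep3 (ms, gl, gar) c).1 (pvStep3 (ms, gl, gar) c).2.1 (pvStep3 (ms, gl, gar) c).2.2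
      simpa using this

-- L2: the garbage flag of the 3-state machine corresponds to pvStrip/pvSkip
theorem pvL2 : ∀ (cs : List Char) (ms gl : Int),
    ((cs.foldl pvStep3 (ms, gl, false)).1 = ((pvStrip cs).foldl pvScoreStep (ms, gl)).1 ∧
     (cs.foldl pvStep3 (ms, gl, false)).2.1 = ((pvStrip cs).foldl pvScoreStep (ms, gl)).2) ∧
    ((cs.foldl pvStep3 (ms, gl, true)).1 = ((pvSkip cs).foldl pvScoreStep (ms, gl)).1 ∧
     (cs.foldl pvStep3 (ms, gl, true)).2.1 = ((pvSkip cs).foldl pvScoreStep (ms, gl)).2) := by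
  intro cs
  induction cs with
  | nil => intro ms gl; simp [pvStrip, pvSkip]
  | cons c rest ih =>
      intro ms gl
      constructor
      · -- garbage closed
        by_cases h1 : c = '<'
        · subst h1
          have : pvStep3 (ms, gl, false) '<' = (ms, gl, true) := by simp [pvStep3]
          simp only [pvStrip, List.foldl, this, if_pos]
          exact (ih ms gl).2
        · have hs : pvStrip (c :: rest) = c :: pvStrip rest := by simp [pvStrip, h1]
          have he : pvStep3 (ms, gl, false) c =
              ((pvScoreStep (ms, gl) c).1, (pvScoreStep (ms, gl) c).2, false) := by
            by_cases h2 : c = '>'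
            · subst h2; simp [pvStep3, pvScoreStep]
            · by_cases h3 : c = '{'
              · subst h3; simp [pvStep3, pvScoreStep]
              · by_cases h4 : c = '}'
                · subst h4; simp [pvStep3, pvScoreStep]
                · simp [pvStep3, pvScoreStep, h1, h2, h3, h4]
          simp only [hs, List.foldl, he]
          exact (ih (pvScoreStep (ms, gl) c).1 (pvScoreStep (ms, gl) c).2).1
      · -- garbage open
        by_cases h2 : c = '>'
        · subst h2
          have : pvStep3 (ms, gl, true) '>' = (ms, gl, false) := by simp [pvStep3]
          simp only [pvSkip, List.foldl, this, if_pos]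
          exact (ih ms gl).1
        · have hs : pvSkip (c :: rest) = pvSkip rest := by simp [pvSkip, h2]
          have he : pvStep3 (ms, gl, true) c = (ms, gl, true) := by
            simp [pvStep3, h2]
          simp only [hs, List.foldl, he]
          exact (ih ms gl).2

theorem pvLine (line : String) :
    part1Line line = ((pvStrip (pvCancel line.toList)).foldl pvScoreStep (0, 0)).1 := by
  unfold part1Line
  rw [(pvL1 line.toList 0 0 false).1]
  exact ((pvL2 (pvCancel line.toList) 0 0).1).1

theorem pvFoldLast : ∀ (l : String) (ls : List String) (a : Int),
    (l :: ls).foldl (fun _ line => part1Line line) a = part1Line ((l :: ls).getLast (by simp)) := by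
  intro l ls
  induction ls generalizing l with
  | nil => intro a; simp
  | cons x xs ih =>
      intro a
      simp only [List.foldl]
      have := ih x (part1Line l)
      simpa using this

-- ===== VERDICT (by name: the statement is the Claim_ definition above) =====
theorem part_1_spec : Claim_equal_part_1 := by
  intro inp _ hpre
  unfold Spec_part_1 part_1 part_1_alt
  match inp, hpre with
  | l :: ls, _ =>
    rw [pvFoldLast l ls 0, PySem.List.pyGet?_neg_one]
    have hgl : (l :: ls).getLast? = some ((l :: ls).getLast (by simp)) := by
      simp [List.getLast?_eq_some_getLast]
    rw [hgl]
    exact pvLine _
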